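-- pv_equiv track=rewrite | github.com/Aditya-PARTech/SmartSelling | CreateModel.py | add_price_range
-- ===== SOURCE A (Python) =====
-- def add_price_range(dataTemp):
--     prices = []
--     for price in dataTemp['Price']:
--         if price <= 50:
--             prices.append(0)
--
--         elif price > 50 and price <= 100:
--             prices.append(1)
--
--         elif price > 100 and price <= 150:
--             prices.append(2)
--
--         elif price > 150 and price <= 200:
--             prices.append(3)
--
--         elif price > 200 and price <= 250:
--             prices.append(4)
--
--         elif price > 250 and price <= 300:
--             prices.append(5)
--
--         if price > 300:
--             prices.append(6)
--
--     return prices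
-- ===== SOURCE B (Python) =====
-- def add_price_range(dataTemp):
--     boundaries = [50, 100, 150, 200, 250, 300]
--
--     def bisect_left(a, x):
--         lo, hi = 0, len(a)
--         while lo < hi:
--             mid = (lo + hi) // 2
--             if a[mid] < x:
--                 lo = mid + 1
--             else:
--                 hi = mid
--         return lo
--
--     return [bisect_left(boundaries, price) for price in dataTemp['Price']]
-- ===== Notes on version B (the rewrite author's own statement) =====
-- stated objective: idiomatic
-- what changed: Replaces the seven-way linear comparison chain with a hand-written binary search (bisect_left) over a sorted boundary table, mapping each price to its bucket index in one comprehension.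
import Mathlib
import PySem

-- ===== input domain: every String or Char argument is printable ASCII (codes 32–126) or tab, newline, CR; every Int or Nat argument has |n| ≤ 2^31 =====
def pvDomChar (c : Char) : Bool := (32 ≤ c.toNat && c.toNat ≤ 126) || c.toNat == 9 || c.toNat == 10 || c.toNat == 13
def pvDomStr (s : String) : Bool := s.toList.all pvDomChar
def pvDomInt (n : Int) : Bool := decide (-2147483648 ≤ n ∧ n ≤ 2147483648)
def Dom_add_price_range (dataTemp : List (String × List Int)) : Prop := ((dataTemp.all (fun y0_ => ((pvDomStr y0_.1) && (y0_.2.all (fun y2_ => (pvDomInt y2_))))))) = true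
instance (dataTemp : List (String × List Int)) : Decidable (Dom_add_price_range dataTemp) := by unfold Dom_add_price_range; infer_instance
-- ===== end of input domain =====

-- B replaces A's seven-way comparison chain by a binary search over a sorted boundary table (idiomatic bisect_left).

-- ===== PORT A =====
def add_price_range (dataTemp : List (String × List Int)) : List Int :=
  (((PySem.Dict.mk dataTemp).get? "Price").getD []).foldl
    (fun prices price =>
      let prices1 :=
        if price ≤ 50 then prices ++ [(0 : Int)]
        else if price > 50 ∧ price ≤ 100 then prices ++ [1]
        else if price > 100 ∧ price ≤ 150 then prices ++ [2]
        else if price > 150 ∧ price ≤ 200 then prices ++ [3]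
        else if price > 200 ∧ price ≤ 250 then prices ++ [4]
        else if price > 250 ∧ price ≤ 300 then prices ++ [5]
        else prices
      if price > 300 then prices1 ++ [6] else prices1)
    []

-- ===== PORT B =====
-- Python's bisect_left while-loop; the fuel argument (called with a.length, which bounds the
-- number of iterations since hi - lo shrinks each step) only makes the same computation total.
def bisectLeftLoop (a : List Int) (x : Int) : Nat → Nat → Nat → Nat
  | 0, lo, _ => lo
  | fuel + 1, lo, hi =>
    if lo < hi then
      let mid := (lo + hi) / 2
      -- a[mid] with mid always in range (lo ≤ mid < hi ≤ a.length), so getD is exact here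
      if a.getD mid 0 < x then bisectLeftLoop a x fuel (mid + 1) hi
      else bisectLeftLoop a x fuel lo mid
    else lo

def add_price_range_alt (dataTemp : List (String × List Int)) : List Int :=
  let boundaries : List Int := [50, 100, 150, 200, 250, 300]
  (((PySem.Dict.mk dataTemp).get? "Price").getD []).map
    (fun price => (bisectLeftLoop boundaries price boundaries.length 0 boundaries.length : Int))

-- ===== PRECONDITION & SPEC =====
-- Pre_ excludes inputs without a 'Price' key, on which Python A raises KeyError.
def Pre_add_price_range (dataTemp : List (String × List Int)) : Prop :=
  ((PySem.Dict.mk dataTemp).get? "Price").isSome = true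
instance (dataTemp : List (String × List Int)) : Decidable (Pre_add_price_range dataTemp) := by unfold Pre_add_price_range; infer_instance
def pvWitness_add_price_range : (List (String × List Int)) := [("Price", [10, 60, 320])]
def Spec_add_price_range (dataTemp : List (String × List Int)) (out : List Int) : Prop := out = add_price_range_alt dataTemp
instance (dataTemp : List (String × List Int)) (out : List Int) : Decidable (Spec_add_price_range dataTemp out) := by unfold Spec_add_price_range; infer_instance

-- ===== CLAIM (what is proved, stated in full; the proofs are below) =====
def Claim_equal_add_price_range : Prop := ∀ (dataTemp : List (String × List Int)), Dom_add_price_range dataTemp → Pre_add_price_range dataTemp → Spec_add_price_range dataTemp (add_price_range dataTemp)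

-- ===== LEMMAS AND PROOFS =====

-- the binary search over the fixed boundary table, as a closed form
set_option maxHeartbeats 1000000 in
lemma bisect_closed (p : Int) :
    bisectLeftLoop [50, 100, 150, 200, 250, 300] p 6 0 6 =
      if p ≤ 50 then 0 else if p ≤ 100 then 1 else if p ≤ 150 then 2
      else if p ≤ 200 then 3 else if p ≤ 250 then 4 else if p ≤ 300 then 5 else 6 := by
  simp [bisectLeftLoop]
  split_ifs <;> omega

-- one iteration of A's loop body appends exactly the bucket B computes
lemma step_eq (acc : List Int) (p : Int) :
    (let prices1 :=
        if p ≤ 50 then acc ++ [(0 : Int)]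
        else if p > 50 ∧ p ≤ 100 then acc ++ [1]
        else if p > 100 ∧ p ≤ 150 then acc ++ [2]
        else if p > 150 ∧ p ≤ 200 then acc ++ [3]
        else if p > 200 ∧ p ≤ 250 then acc ++ [4]
        else if p > 250 ∧ p ≤ 300 then acc ++ [5]
        else acc
     if p > 300 then prices1 ++ [6] else prices1)
    = acc ++ [(bisectLeftLoop [50, 100, 150, 200, 250, 300] p 6 0 6 : Int)] := by
  rw [bisect_closed]
  split_ifs <;> simp_all <;> omega

lemma foldl_eq (ps : List Int) (acc : List Int) :
    ps.foldl
      (fun prices price =>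
        let prices1 :=
          if price ≤ 50 then prices ++ [(0 : Int)]
          else if price > 50 ∧ price ≤ 100 then prices ++ [1]
          else if price > 100 ∧ price ≤ 150 then prices ++ [2]
          else if price > 150 ∧ price ≤ 200 then prices ++ [3]
          else if price > 200 ∧ price ≤ 250 then prices ++ [4]
          else if price > 250 ∧ price ≤ 300 then prices ++ [5]
          else prices
        if price > 300 then prices1 ++ [6] else prices1)
      acc
    = acc ++ ps.map (fun p => (bisectLeftLoop [50, 100, 150, 200, 250, 300] p 6 0 6 : Int)) := by
  induction ps generalizing acc with
  | nil => simp
  | cons p ps ih =>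
    simp only [List.foldl_cons, List.map_cons]
    rw [ih, step_eq acc p]
    simp

-- ===== VERDICT (by name: the statement is the Claim_ definition above) =====
theorem add_price_range_spec : Claim_equal_add_price_range := by
  intro dataTemp _ _
  unfold Spec_add_price_range add_price_range add_price_range_alt
  simpa using foldl_eq (((PySem.Dict.mk dataTemp).get? "Price").getD []) []
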